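-- pv_equiv track=rewrite | github.com/thetwoj/advent-of-code-2020 | day06/answer_checker.py | group_answers
-- ===== SOURCE A (Python) =====
-- def group_answers(inputs):
--     answers = []
--     current_group = set()
--     for line in inputs:
--         if line == "":
--             answers.append(current_group)
--             current_group = set()
--             continue
--         for answer in line:
--             current_group.add(answer)
--     answers.append(current_group)
--     return answers
-- ===== SOURCE B (Python) =====
-- def group_answers(inputs):
--     # Two passes: first partition lines into blank-separated segments,
--     # then summarise each segment into its set of answer characters.
--     segments = [[]]
--     for line in inputs:
--         if line == "":
--             segments.append([])
--         else:
--             segments[-1].append(line)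
--     return [set("".join(seg)) for seg in segments]
-- ===== Notes on version B (the rewrite author's own statement) =====
-- stated objective: alternative
-- what changed: B splits the work into two differently shaped passes: first partition the lines into blank-separated segments, then map each segment to set(''.join(segment)), instead of maintaining a running answer set inline while scanning.
import Mathlib
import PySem

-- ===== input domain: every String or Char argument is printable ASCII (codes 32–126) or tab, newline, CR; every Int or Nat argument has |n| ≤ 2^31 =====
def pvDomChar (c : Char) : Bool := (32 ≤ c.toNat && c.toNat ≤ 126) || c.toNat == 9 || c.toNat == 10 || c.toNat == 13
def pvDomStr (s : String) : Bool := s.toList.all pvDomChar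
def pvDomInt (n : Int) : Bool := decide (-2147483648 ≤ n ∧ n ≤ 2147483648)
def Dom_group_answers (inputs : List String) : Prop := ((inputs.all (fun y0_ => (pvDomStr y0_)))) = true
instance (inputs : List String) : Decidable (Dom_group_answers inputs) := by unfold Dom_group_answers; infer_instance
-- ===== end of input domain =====

-- ===== PORT A =====
-- B differs by decomposition only (two passes instead of one inline running set); same cost, no speed claim.
-- Port of A: one pass keeping the finished groups and the running answer set.
def group_answers (inputs : List String) : List (List String) :=
  let r := inputs.foldl
    (fun (acc : List (List String) × PySem.Set String) (line : String) =>
      if line = "" then (acc.1 ++ [acc.2], PySem.Set.empty)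
      else (acc.1, line.toList.foldl (fun s c => PySem.Set.add s (String.ofList [c])) acc.2))
    ([], PySem.Set.empty)
  r.1 ++ [r.2]

-- ===== PORT B =====
-- B pass 1: partition lines into blank-separated segments (last segment kept in acc.2).
def pvSegments (inputs : List String) : List (List String) :=
  let r := inputs.foldl
    (fun (acc : List (List String) × List String) (line : String) =>
      if line = "" then (acc.1 ++ [acc.2], [])
      else (acc.1, acc.2 ++ [line]))
    ([], [])
  r.1 ++ [r.2]

-- B pass 2: set("".join(seg)) for one segment (elements are 1-char strings, Python's iteration of str).
def pvSummarise (seg : List String) : PySem.Set String :=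
  PySem.Set.ofList ((PySem.Str.join "" seg).toList.map (fun c => String.ofList [c]))

def group_answers_alt (inputs : List String) : List (List String) :=
  (pvSegments inputs).map pvSummarise

-- ===== PRECONDITION & SPEC =====
def Spec_group_answers (inputs : List String) (out : List (List String)) : Prop := out = group_answers_alt inputs
instance (inputs : List String) (out : List (List String)) : Decidable (Spec_group_answers inputs out) := by unfold Spec_group_answers; infer_instance

-- ===== CLAIM (what is proved, stated in full; the proofs are below) =====
def Claim_equal_group_answers : Prop := ∀ (inputs : List String), Dom_group_answers inputs → Spec_group_answers inputs (group_answers inputs)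

-- ===== LEMMAS AND PROOFS =====
theorem pvJoin_chars (seg : List String) :
    (PySem.Str.join "" seg).toList = (seg.map String.toList).flatten := by
  simp only [PySem.Str.toList_join]
  have : ("" : String).toList = [] := rfl
  rw [this]
  induction seg with
  | nil => simp [PySem.Chars.join, List.intercalate]
  | cons a rest ih =>
    cases rest with
    | nil => simp [PySem.Chars.join, List.intercalate]
    | cons b r =>
      simp only [List.map_cons, PySem.Chars.join_cons_cons, List.flatten_cons] at ih ⊢
      simp [ih]

theorem pvSummarise_append (seg : List String) (line : String) :
    pvSummarise (seg ++ [line]) =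
      line.toList.foldl (fun s c => PySem.Set.add s (String.ofList [c])) (pvSummarise seg) := by
  unfold pvSummarise
  simp only [pvJoin_chars, List.map_append, List.flatten_append, List.map_singleton,
    List.flatten_cons, List.flatten_nil, List.append_nil, List.map_append,
    PySem.Set.ofList, List.foldl_append, List.foldl_map]

theorem pv_main (inputs : List String) (done : List (List String)) (cur : List String) :
    (inputs.foldl
      (fun (acc : List (List String) × PySem.Set String) (line : String) =>
        if line = "" then (acc.1 ++ [acc.2], PySem.Set.empty)
        else (acc.1, line.toList.foldl (fun s c => PySem.Set.add s (String.ofList [c])) acc.2))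
      (done.map pvSummarise, pvSummarise cur)) =
    (let r := inputs.foldl
      (fun (acc : List (List String) × List String) (line : String) =>
        if line = "" then (acc.1 ++ [acc.2], [])
        else (acc.1, acc.2 ++ [line]))
      (done, cur)
     (r.1.map pvSummarise, pvSummarise r.2)) := by
  induction inputs generalizing done cur with
  | nil => simp
  | cons l rest ih =>
    by_cases h : l = ""
    · subst h
      simpa [pvSummarise, PySem.Set.ofList] using ih (done ++ [cur]) []
    · simpa [h, ← pvSummarise_append] using ih done (cur ++ [l])

-- ===== VERDICT (by name: the statement is the Claim_ definition above) =====
theorem group_answers_spec : Claim_equal_group_answers := by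
  intro inputs _
  unfold Spec_group_answers group_answers group_answers_alt pvSegments
  have h := pv_main inputs [] []
  rw [show pvSummarise [] = PySem.Set.empty from rfl] at h
  simp only [List.map_nil] at h
  simp only [h, List.map_append, List.map_cons, List.map_nil]
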